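-- pv_equiv track=rewrite | github.com/androidYibo/documents | Pop/uge3/Kasper_Passov_49_genaflevering.py | __check_all_elements
-- ===== SOURCE A (Python) =====
-- def __check_all_elements(lists):
--     """Private funktion der returnere True hvis alle elementer i listen møder
--        hinanden præcist en gang i bloksystemet"""
--     all_elements = []
--     for l in lists:
--         if not __check_for_repeats(l):
--             return False
--         all_elements = __union(all_elements, l)
--     all_pairs = __create_all_pairs(all_elements, [])
--     for pair in all_pairs:
--         has_found = False
--         for l in lists:
--             if pair[0] in l and pair[1] in l:
--                if has_found == True:
--                   return False #hvis det samme par er flere steder i koden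
--                has_found = True
--         if has_found == False:
--             return False #den kommer hertil hvis paret ikke findes nogen liste
--     return True
--
-- def __create_all_pairs(all_elements, all_pairs):
--     """Lave alle mulige par imellem elementerne"""
--     if len(all_elements) == 1:
--         return all_pairs
--     current_element = all_elements[0]
--     for element in all_elements[1:]:
--         all_pairs.append([current_element, element])
--     return __create_all_pairs(all_elements[1:], all_pairs)
--
-- def __union(l1, l2):
--     """Privat funktion der returnere en liste med alle unike elementer imellem de to lister"""
--     lt = __union_helper(l1, [])
--     return __union_helper(l2, lt)
--
-- def __union_helper(le, lr):
--     """Private hjælpefunktion der tager alle elementer i list_element(le) og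
--        lægger dem i list_return(lr) hvis elementet ikke alerede findes"""
--     for e in le:
--         if not e in lr:
--             lr.append(e)
--     return lr
--
-- def __check_for_repeats(l):
--     """Checks if there are multiple of the same element in the list"""
--     if l == []:
--         return True
--     for e in l[1:]:
--         if l[0] == e:
--             return False
--     return __check_for_repeats(l[1:])
-- ===== SOURCE B (Python) =====
-- def __check_all_elements(lists):
--     """True iff no block repeats an element and every pair of distinct
--        elements of the block system occurs together in exactly one block."""
--     counts = {}
--     elems = set()
--     for l in lists:
--         if len(set(l)) != len(l):
--             return False
--         elems.update(l)
--         for i, a in enumerate(l):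
--             for b in l[i + 1:]:
--                 key = (a, b) if a < b else (b, a)
--                 counts[key] = counts.get(key, 0) + 1
--     es = sorted(elems)
--     return all(counts.get((a, b), 0) == 1
--                for i, a in enumerate(es)
--                for b in es[i + 1:])
-- ===== Notes on version B (the rewrite author's own statement) =====
-- stated objective: alternative
-- what changed: B replaces A's quadratic union/repeat scans and its per-pair rescan of every block by one counting pass (a dict of per-block pair counts, set-based duplicate check) followed by a count==1 lookup for every pair of the element set.
import Mathlib
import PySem

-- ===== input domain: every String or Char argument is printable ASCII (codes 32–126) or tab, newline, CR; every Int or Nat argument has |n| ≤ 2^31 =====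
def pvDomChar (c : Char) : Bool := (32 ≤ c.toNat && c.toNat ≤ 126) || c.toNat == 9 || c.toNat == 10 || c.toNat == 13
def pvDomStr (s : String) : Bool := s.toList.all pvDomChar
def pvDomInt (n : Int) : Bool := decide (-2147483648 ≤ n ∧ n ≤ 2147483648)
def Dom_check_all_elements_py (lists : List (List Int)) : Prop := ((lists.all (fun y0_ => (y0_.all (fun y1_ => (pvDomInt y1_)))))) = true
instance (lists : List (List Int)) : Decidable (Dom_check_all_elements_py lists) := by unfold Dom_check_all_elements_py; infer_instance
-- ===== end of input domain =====

-- B (alternative algorithm): instead of A's per-pair rescan of every block, one counting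
-- pass builds a dict of per-block pair counts, then each global pair is looked up once.

-- ===== PORT A =====
-- __check_for_repeats: returns False iff the head occurs in the tail, recursing on the tail
def pyCheckForRepeats : List Int → Bool
  | [] => true
  | a :: rest => if a ∈ rest then false else pyCheckForRepeats rest

-- __union_helper: append each element of le not already in lr
def pyUnionHelper (le lr : List Int) : List Int :=
  le.foldl (fun lr e => if e ∈ lr then lr else lr ++ [e]) lr

-- __union
def pyUnion (l1 l2 : List Int) : List Int := pyUnionHelper l2 (pyUnionHelper l1 [])

-- __create_all_pairs (pairs as products).  On [] Python raises IndexError (all_elements[0]);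
-- that input is excluded by Pre_, the value returned here is arbitrary.
def pyCreateAllPairs : List Int → List (Int × Int) → List (Int × Int)
  | [], acc => acc
  | a :: rest, acc =>
      if rest.isEmpty then acc
      else pyCreateAllPairs rest (acc ++ rest.map (fun e => (a, e)))

-- the inner 'for l in lists' loop of the pair check; none = the early 'return False'
-- (pair found twice), some found = loop finished with the has_found flag
def pyInnerLoop (x y : Int) : List (List Int) → Bool → Option Bool
  | [], found => some found
  | l :: rest, found =>
      if x ∈ l ∧ y ∈ l then
        if found then none else pyInnerLoop x y rest true
      else pyInnerLoop x y rest found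

-- the outer 'for pair in all_pairs' loop
def pyPairLoop (lists : List (List Int)) : List (Int × Int) → Bool
  | [] => true
  | p :: rest =>
      match pyInnerLoop p.1 p.2 lists false with
      | none => false
      | some found => if found then pyPairLoop lists rest else false

-- the first loop: repeat check + union accumulation; none = the early 'return False'
def pyMainLoop : List (List Int) → List Int → Option (List Int)
  | [], acc => some acc
  | l :: rest, acc =>
      if pyCheckForRepeats l then pyMainLoop rest (pyUnion acc l) else none

def check_all_elements_py (lists : List (List Int)) : Bool :=
  match pyMainLoop lists [] with
  | none => false
  | some allElements => pyPairLoop lists (pyCreateAllPairs allElements [])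

-- ===== PORT B =====
-- key = (a, b) if a < b else (b, a)
def bKey (a b : Int) : Int × Int := if a < b then (a, b) else (b, a)

-- inner 'for b in l[i+1:]' counting loop
def bAddPairsFrom (a : Int) (counts : PySem.Dict (Int × Int) Int) (rest : List Int) :
    PySem.Dict (Int × Int) Int :=
  rest.foldl (fun c b => c.insert (bKey a b) (c.getD (bKey a b) 0 + 1)) counts

-- 'for i, a in enumerate(l): for b in l[i+1:]'
def bAddBlock (counts : PySem.Dict (Int × Int) Int) : List Int → PySem.Dict (Int × Int) Int
  | [] => counts
  | a :: rest => bAddBlock (bAddPairsFrom a counts rest) rest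

-- the single pass over the blocks; none = the early 'return False' on a repeated element
def bLoop : List (List Int) → PySem.Set Int → PySem.Dict (Int × Int) Int →
    Option (PySem.Set Int × PySem.Dict (Int × Int) Int)
  | [], elems, counts => some (elems, counts)
  | l :: rest, elems, counts =>
      if (PySem.Set.ofList l).length ≠ l.length then none
      else bLoop rest (PySem.Set.update elems l) (bAddBlock counts l)

-- the pairs (a, b) with a before b in es (the final double comprehension)
def bPairs : List Int → List (Int × Int)
  | [] => []
  | a :: rest => rest.map (fun b => (a, b)) ++ bPairs rest

def check_all_elements_py_alt (lists : List (List Int)) : Bool :=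
  match bLoop lists PySem.Set.empty PySem.Dict.empty with
  | none => false
  | some (elems, counts) =>
      let es := PySem.List.sorted elems (fun x => x) false
      (bPairs es).all (fun p => counts.getD p 0 == 1)

-- ===== PRECONDITION & SPEC =====
-- Pre_ excludes exactly the inputs where A raises IndexError: when every block is empty
-- (including lists == []) __create_all_pairs is called on the empty union and reads its
-- head; B returns True there (no elements, hence no pairs to check).
def Pre_check_all_elements_py (lists : List (List Int)) : Prop := ∃ l ∈ lists, l ≠ []
instance (lists : List (List Int)) : Decidable (Pre_check_all_elements_py lists) := by
  unfold Pre_check_all_elements_py; infer_instance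
def pvWitness_check_all_elements_py : List (List Int) := [[1, 2]]

def Spec_check_all_elements_py (lists : List (List Int)) (out : Bool) : Prop :=
  out = check_all_elements_py_alt lists
instance (lists : List (List Int)) (out : Bool) : Decidable (Spec_check_all_elements_py lists out) := by
  unfold Spec_check_all_elements_py; infer_instance

-- ===== CLAIM (what is proved, stated in full; the proofs are below) =====
def Claim_equal_check_all_elements_py : Prop := ∀ (lists : List (List Int)), Dom_check_all_elements_py lists → Pre_check_all_elements_py lists → Spec_check_all_elements_py lists (check_all_elements_py lists)
-- ===== LEMMAS AND PROOFS =====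

-- the common specification: every block is duplicate-free and every pair of distinct
-- elements occurs together in exactly one block
def PairSpec (lists : List (List Int)) : Prop :=
  (∀ l ∈ lists, l.Nodup) ∧
  ∀ x y : Int, x ≠ y → x ∈ lists.flatten → y ∈ lists.flatten →
    lists.countP (fun l => decide (x ∈ l) && decide (y ∈ l)) = 1

theorem checkForRepeats_iff (l : List Int) : pyCheckForRepeats l = true ↔ l.Nodup := by
  induction l with
  | nil => simp [pyCheckForRepeats]
  | cons a rest ih => by_cases h : a ∈ rest <;> simp [pyCheckForRepeats, h, ih]


-- --- A-side loop characterizations ---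

theorem unionHelper_eq (le lr : List Int) : pyUnionHelper le lr = PySem.Set.update lr le := by
  induction le generalizing lr with
  | nil => simp [pyUnionHelper, List.foldl, PySem.Set.update_nil]
  | cons e le ih =>
      have h1 : pyUnionHelper (e :: le) lr = pyUnionHelper le (PySem.Set.add lr e) := by
        simp [pyUnionHelper, List.foldl, PySem.Set.add_eq_ite]
      rw [h1, ih, PySem.Set.update_cons]

theorem mem_union (x : Int) (l1 l2 : List Int) :
    x ∈ pyUnion l1 l2 ↔ x ∈ l1 ∨ x ∈ l2 := by
  simp [pyUnion, unionHelper_eq, PySem.Set.update_nil_left, PySem.Set.mem_update,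
    PySem.Set.mem_ofList]

theorem nodup_union (l1 l2 : List Int) : (pyUnion l1 l2).Nodup := by
  simp [pyUnion, unionHelper_eq, PySem.Set.update_nil_left]
  exact PySem.Set.nodup_update _ _ (PySem.Set.nodup_ofList l1)

theorem mainLoop_eq (ls : List (List Int)) (acc : List Int) :
    pyMainLoop ls acc =
      if ls.all pyCheckForRepeats then some (ls.foldl (fun a l => pyUnion a l) acc)
      else none := by
  induction ls generalizing acc with
  | nil => simp [pyMainLoop]
  | cons l rest ih =>
      by_cases h : pyCheckForRepeats l <;> simp [pyMainLoop, h, ih]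

theorem mem_foldl_union (ls : List (List Int)) (acc : List Int) (x : Int) :
    x ∈ ls.foldl (fun a l => pyUnion a l) acc ↔ x ∈ acc ∨ x ∈ ls.flatten := by
  induction ls generalizing acc with
  | nil => simp
  | cons l rest ih => simp [ih, mem_union]; tauto

theorem nodup_foldl_union (ls : List (List Int)) (acc : List Int) (h : acc.Nodup) :
    (ls.foldl (fun a l => pyUnion a l) acc).Nodup := by
  induction ls generalizing acc with
  | nil => exact h
  | cons l rest ih => exact ih _ (nodup_union acc l)

-- --- pair enumeration ---

theorem createAllPairs_eq (u : List Int) (acc : List (Int × Int)) :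
    pyCreateAllPairs u acc = acc ++ bPairs u := by
  induction u generalizing acc with
  | nil => simp [pyCreateAllPairs, bPairs]
  | cons a rest ih =>
      cases rest with
      | nil => simp [pyCreateAllPairs, bPairs]
      | cons b t =>
          rw [pyCreateAllPairs]
          simp only [List.isEmpty_cons, if_false, Bool.false_eq_true, ih, bPairs,
            List.append_assoc]

theorem mem_of_mem_bPairs {u : List Int} {p : Int × Int} (h : p ∈ bPairs u) :
    p.1 ∈ u ∧ p.2 ∈ u := by
  induction u with
  | nil => simp [bPairs] at h
  | cons a rest ih =>
      simp [bPairs] at h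
      rcases h with ⟨b, hb, rfl⟩ | h
      · simp [hb]
      · rcases ih h with ⟨h1, h2⟩; simp [h1, h2]

theorem rel_of_mem_bPairs {R : Int → Int → Prop} {u : List Int} (hu : u.Pairwise R)
    {p : Int × Int} (h : p ∈ bPairs u) : R p.1 p.2 := by
  induction u with
  | nil => simp [bPairs] at h
  | cons a rest ih =>
      rw [List.pairwise_cons] at hu
      simp [bPairs] at h
      rcases h with ⟨b, hb, rfl⟩ | h
      · exact hu.1 b hb
      · exact ih hu.2 h

theorem cover_bPairs {u : List Int} {x y : Int} (hx : x ∈ u) (hy : y ∈ u) (hne : x ≠ y) :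
    (x, y) ∈ bPairs u ∨ (y, x) ∈ bPairs u := by
  induction u with
  | nil => simp at hx
  | cons a rest ih =>
      simp at hx hy
      rcases hx with rfl | hx
      · rcases hy with rfl | hy
        · exact absurd rfl hne
        · left; simp only [bPairs]
          exact List.mem_append_left _ (List.mem_map.mpr ⟨y, hy, rfl⟩)
      · rcases hy with rfl | hy
        · right; simp only [bPairs]
          exact List.mem_append_left _ (List.mem_map.mpr ⟨x, hx, rfl⟩)
        · rcases ih hx hy with h | h
          · left; simp only [bPairs]; exact List.mem_append_right _ h
          · right; simp only [bPairs]; exact List.mem_append_right _ h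

-- --- A's pair-checking loops ---

theorem innerLoop_eq (x y : Int) (ls : List (List Int)) (found : Bool) :
    pyInnerLoop x y ls found =
      (if 2 ≤ ls.countP (fun l => decide (x ∈ l) && decide (y ∈ l)) + found.toNat then none
       else some (decide (ls.countP (fun l => decide (x ∈ l) && decide (y ∈ l)) + found.toNat = 1))) := by
  induction ls generalizing found with
  | nil => cases found <;> simp [pyInnerLoop]
  | cons l rest ih =>
      by_cases h : x ∈ l ∧ y ∈ l
      · have hc : (l :: rest).countP (fun l => decide (x ∈ l) && decide (y ∈ l))
            = rest.countP (fun l => decide (x ∈ l) && decide (y ∈ l)) + 1 := by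
          simp [List.countP_cons, h.1, h.2]
        cases found
        · simp only [pyInnerLoop, if_pos h, Bool.false_eq_true, if_false, ih, hc,
            Bool.toNat_true, Bool.toNat_false]
          split_ifs <;>
            first | rfl | omega | (exfalso; omega) | (simp only [decide_eq_decide]; omega)
        · simp only [pyInnerLoop, if_pos h, if_true, hc, Bool.toNat_true, Bool.toNat_false]
          split_ifs <;>
            first | rfl | omega | (exfalso; omega) | (simp only [decide_eq_decide]; omega)
      · have hc : (l :: rest).countP (fun l => decide (x ∈ l) && decide (y ∈ l))
            = rest.countP (fun l => decide (x ∈ l) && decide (y ∈ l)) := by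
          simp only [List.countP_cons]
          have : ¬ (x ∈ l ∧ y ∈ l) := h
          by_cases hx : x ∈ l <;> by_cases hy : y ∈ l <;> simp [hx, hy] <;> tauto
        simp only [pyInnerLoop, if_neg h, ih, hc]

theorem pairLoop_iff (lists : List (List Int)) (ps : List (Int × Int)) :
    pyPairLoop lists ps = true ↔
      ∀ p ∈ ps, lists.countP (fun l => decide (p.1 ∈ l) && decide (p.2 ∈ l)) = 1 := by
  induction ps with
  | nil => simp [pyPairLoop]
  | cons p rest ih =>
      rw [pyPairLoop, innerLoop_eq]
      rcases hc : lists.countP (fun l => decide (p.1 ∈ l) && decide (p.2 ∈ l)) with _ | n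
      · simp [hc, ih]
      · rcases n with _ | m
        · simp [hc, ih]
        · simp only [hc, ih, Bool.toNat_false, Nat.add_zero]
          have h2 : 2 ≤ m + 1 + 1 := by omega
          simp [h2]
          omega

theorem countP_pair_symm (lists : List (List Int)) (x y : Int) :
    lists.countP (fun l => decide (x ∈ l) && decide (y ∈ l))
      = lists.countP (fun l => decide (y ∈ l) && decide (x ∈ l)) :=
  List.countP_congr (fun l _ => by rw [Bool.and_comm])

-- common final step: the per-pair check over any duplicate-free enumeration u of the
-- elements is the pair condition of PairSpec
theorem pairs_all_iff (lists : List (List Int)) (u : List Int) (hnd : u.Nodup)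
    (hmem : ∀ x : Int, x ∈ u ↔ x ∈ lists.flatten) :
    (∀ p ∈ bPairs u, lists.countP (fun l => decide (p.1 ∈ l) && decide (p.2 ∈ l)) = 1) ↔
      (∀ x y : Int, x ≠ y → x ∈ lists.flatten → y ∈ lists.flatten →
        lists.countP (fun l => decide (x ∈ l) && decide (y ∈ l)) = 1) := by
  constructor
  · intro hp x y hne hx hy
    rcases cover_bPairs ((hmem x).mpr hx) ((hmem y).mpr hy) hne with h | h
    · exact hp _ h
    · rw [countP_pair_symm]; exact hp _ h
  · intro hs p hp
    obtain ⟨h1, h2⟩ := mem_of_mem_bPairs hp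
    have hne : p.1 ≠ p.2 := rel_of_mem_bPairs hnd hp
    exact hs _ _ hne ((hmem _).mp h1) ((hmem _).mp h2)

theorem check_A_iff (lists : List (List Int)) :
    check_all_elements_py lists = true ↔ PairSpec lists := by
  unfold check_all_elements_py
  rw [mainLoop_eq]
  by_cases hall : lists.all pyCheckForRepeats = true
  · have hnd : ∀ l ∈ lists, l.Nodup := fun l hl =>
      (checkForRepeats_iff l).mp (List.all_eq_true.mp hall l hl)
    simp only [hall, if_true]
    rw [createAllPairs_eq, List.nil_append, pairLoop_iff]
    unfold PairSpec
    rw [pairs_all_iff lists _ (nodup_foldl_union lists [] List.nodup_nil)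
      (fun x => by rw [mem_foldl_union]; simp)]
    simp [hnd]
    exact fun _ => hnd
  · simp only [hall, Bool.false_eq_true, if_false]
    constructor
    · intro h; exact absurd h (by simp)
    · intro hs
      exfalso
      rw [List.all_eq_true] at hall
      push_neg at hall
      obtain ⟨l, hl, hrep⟩ := hall
      exact hrep ((checkForRepeats_iff l).mpr (hs.1 l hl))

-- --- B-side loop characterizations ---

theorem ofList_length_iff (l : List Int) :
    (PySem.Set.ofList l).length = l.length ↔ l.Nodup := by
  constructor
  · intro h
    have hsub : (PySem.Set.ofList l) ⊆ l := fun x hx => (PySem.Set.mem_ofList _ _).mp hx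
    have hsp := List.subperm_of_subset (PySem.Set.nodup_ofList l) hsub
    have hperm := List.Subperm.perm_of_length_le hsp (by omega)
    exact hperm.nodup (PySem.Set.nodup_ofList l)
  · intro h; rw [PySem.Set.ofList_eq_self_of_nodup l h]

theorem bLoop_eq (ls : List (List Int)) (e : PySem.Set Int) (c : PySem.Dict (Int × Int) Int) :
    bLoop ls e c =
      if ls.all (fun l => decide ((PySem.Set.ofList l).length = l.length))
      then some (ls.foldl (fun p l => (PySem.Set.update p.1 l, bAddBlock p.2 l)) (e, c))
      else none := by
  induction ls generalizing e c with
  | nil => simp [bLoop]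
  | cons l rest ih =>
      by_cases h : (PySem.Set.ofList l).length = l.length
      · simp [bLoop, h, ih]
      · simp [bLoop, h]

theorem mem_foldl_setupdate (ls : List (List Int)) (acc : PySem.Set Int) (x : Int) :
    x ∈ ls.foldl (fun s l => PySem.Set.update s l) acc ↔ x ∈ acc ∨ x ∈ ls.flatten := by
  induction ls generalizing acc with
  | nil => simp
  | cons l rest ih => simp [ih, PySem.Set.mem_update]; tauto

theorem nodup_foldl_setupdate (ls : List (List Int)) (acc : PySem.Set Int) (h : acc.Nodup) :
    (ls.foldl (fun s l => PySem.Set.update s l) acc).Nodup := by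
  induction ls generalizing acc with
  | nil => exact h
  | cons l rest ih => exact ih _ (PySem.Set.nodup_update _ _ h)

theorem bKey_eq_iff (a b x y : Int) :
    bKey a b = bKey x y ↔ (a = x ∧ b = y) ∨ (a = y ∧ b = x) := by
  unfold bKey; split_ifs <;> simp [Prod.ext_iff] <;> omega

theorem getD_bAddPairsFrom (a : Int) (rest : List Int) (c : PySem.Dict (Int × Int) Int)
    (k : Int × Int) :
    (bAddPairsFrom a c rest).getD k 0
      = c.getD k 0 + (rest.countP (fun b => bKey a b == k) : Int) := by
  induction rest generalizing c with
  | nil => simp [bAddPairsFrom]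
  | cons b t ih =>
      have hstep : bAddPairsFrom a c (b :: t)
          = bAddPairsFrom a (c.insert (bKey a b) (c.getD (bKey a b) 0 + 1)) t := rfl
      rw [hstep, ih, List.countP_cons]
      by_cases h : k = bKey a b
      · subst h
        simp [PySem.Dict.getD_insert, List.countP_cons]
        push_cast
        ring
      · have hb : (bKey a b == k) = false := by
          simp only [beq_eq_false_iff_ne, ne_eq]
          exact fun hh => h hh.symm
        simp [PySem.Dict.getD_insert, h, hb]

theorem getD_bAddBlock (l : List Int) (c : PySem.Dict (Int × Int) Int) (k : Int × Int) :
    (bAddBlock c l).getD k 0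
      = c.getD k 0 + ((bPairs l).countP (fun p => bKey p.1 p.2 == k) : Int) := by
  induction l generalizing c with
  | nil => simp [bAddBlock, bPairs]
  | cons a t ih =>
      rw [show bAddBlock c (a :: t) = bAddBlock (bAddPairsFrom a c t) t from rfl, ih,
        getD_bAddPairsFrom]
      simp only [bPairs, List.countP_append, List.countP_map]
      have hcomp : ((fun p => bKey p.1 p.2 == k) ∘ (fun b => (a, b)))
          = fun b => bKey a b == k := rfl
      rw [hcomp]
      push_cast
      ring

theorem countP_decide_eq {t : List Int} (ht : t.Nodup) (y : Int) :
    t.countP (fun b => decide (b = y)) = if y ∈ t then 1 else 0 := by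
  induction t with
  | nil => simp
  | cons a t ih =>
      rw [List.nodup_cons] at ht
      by_cases h : a = y
      · subst h
        simp [List.countP_cons, ht.1, ih ht.2]
      · simp [List.countP_cons, h, ih ht.2, Ne.symm h]

theorem countP_bPairs_key {l : List Int} (hnd : l.Nodup) {x y : Int} (hne : x ≠ y) :
    (bPairs l).countP (fun p => bKey p.1 p.2 == bKey x y)
      = if x ∈ l ∧ y ∈ l then 1 else 0 := by
  induction l with
  | nil => simp [bPairs]
  | cons a t ih =>
      rw [List.nodup_cons] at hnd
      obtain ⟨ha, ht⟩ := hnd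
      simp only [bPairs, List.countP_append, List.countP_map]
      have hcomp : ((fun p => bKey p.1 p.2 == bKey x y) ∘ (fun b => (a, b)))
          = fun b => decide ((a = x ∧ b = y) ∨ (a = y ∧ b = x)) := by
        funext b
        simp only [Function.comp]
        rw [Bool.eq_iff_iff]
        simp [bKey_eq_iff]
      rw [hcomp, ih ht]
      by_cases hxa : a = x
      · subst hxa
        have hay : ¬ a = y := hne
        have hpred : (fun b => decide ((a = a ∧ b = y) ∨ (a = y ∧ b = a)))
            = fun b => decide (b = y) := by
          funext b; simp [hay]
        rw [hpred, countP_decide_eq ht]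
        simp only [List.mem_cons]
        split_ifs <;> first | rfl | omega | tauto
      · by_cases hya : a = y
        · subst hya
          have hpred : (fun b => decide ((a = x ∧ b = a) ∨ (a = a ∧ b = x)))
              = fun b => decide (b = x) := by
            funext b; simp [hxa]
          rw [hpred, countP_decide_eq ht]
          simp only [List.mem_cons]
          split_ifs <;> first | rfl | omega | tauto
        · have hpred : (fun b => decide ((a = x ∧ b = y) ∨ (a = y ∧ b = x)))
              = fun _ : Int => false := by
            funext b; simp [hxa, hya]
          rw [hpred]
          simp only [List.countP_false, List.mem_cons]
          split_ifs <;> first | rfl | omega | tauto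

theorem getD_foldl_addBlock (ls : List (List Int)) (c : PySem.Dict (Int × Int) Int)
    (x y : Int) (hne : x ≠ y) (hnd : ∀ l ∈ ls, l.Nodup) :
    (ls.foldl (fun d l => bAddBlock d l) c).getD (bKey x y) 0
      = c.getD (bKey x y) 0
        + (ls.countP (fun l => decide (x ∈ l) && decide (y ∈ l)) : Int) := by
  induction ls generalizing c with
  | nil => simp
  | cons l rest ih =>
      rw [List.foldl_cons, ih _ (fun m hm => hnd m (List.mem_cons_of_mem l hm)),
        getD_bAddBlock, countP_bPairs_key (hnd l List.mem_cons_self) hne, List.countP_cons]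
      by_cases hl : x ∈ l ∧ y ∈ l
      · simp [hl]
        push_cast
        ring
      · have : (decide (x ∈ l) && decide (y ∈ l)) = false := by
          rcases not_and_or.mp hl with h | h <;> simp [h]
        simp [hl, this]

theorem check_B_iff (lists : List (List Int)) :
    check_all_elements_py_alt lists = true ↔ PairSpec lists := by
  unfold check_all_elements_py_alt
  rw [bLoop_eq]
  by_cases hall : lists.all (fun l => decide ((PySem.Set.ofList l).length = l.length)) = true
  · have hnd : ∀ l ∈ lists, l.Nodup := fun l hl =>
      (ofList_length_iff l).mp (by simpa using List.all_eq_true.mp hall l hl)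
    simp only [hall, if_true]
    rw [PySem.List.foldl_prod_mk (f := fun s l => PySem.Set.update s l)
      (g := fun d l => bAddBlock d l)]
    set E := lists.foldl (fun s l => PySem.Set.update s l) PySem.Set.empty with hE
    set C := lists.foldl (fun d l => bAddBlock d l) PySem.Dict.empty with hC
    show ((bPairs (PySem.List.sorted E (fun x => x) false)).all
        (fun p => C.getD p 0 == 1)) = true ↔ _
    have hEnd : E.Nodup := nodup_foldl_setupdate lists _ List.nodup_nil
    have hEmem : ∀ x : Int, x ∈ E ↔ x ∈ lists.flatten := fun x => by
      rw [hE, mem_foldl_setupdate]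
      simp [PySem.Set.empty]
    set es := PySem.List.sorted E (fun x : Int => x) false with hes
    have hesnd : es.Nodup := (PySem.List.sorted_perm E (fun x : Int => x) false).symm.nodup hEnd
    have hlt : es.Pairwise (· < ·) := by
      have hle := PySem.List.sorted_pairwise E (fun x : Int => x)
      exact (hle.and hesnd).imp (fun h => lt_of_le_of_ne h.1 h.2)
    have hesmem : ∀ x : Int, x ∈ es ↔ x ∈ lists.flatten := fun x => by
      rw [hes, PySem.List.mem_sorted]
      exact hEmem x
    rw [List.all_eq_true]
    have hgetD : ∀ p ∈ bPairs es, ((C.getD p 0 == 1) = true ↔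
        lists.countP (fun l => decide (p.1 ∈ l) && decide (p.2 ∈ l)) = 1) := by
      intro p hp
      have hplt : p.1 < p.2 := rel_of_mem_bPairs hlt hp
      have hkey : bKey p.1 p.2 = p := by unfold bKey; rw [if_pos hplt]
      rw [beq_iff_eq, hC]
      have hval := getD_foldl_addBlock lists PySem.Dict.empty p.1 p.2 (ne_of_lt hplt) hnd
      rw [hkey] at hval
      rw [hval, PySem.Dict.getD_empty]
      omega
    constructor
    · intro hall2
      refine ⟨hnd, ?_⟩
      rw [← pairs_all_iff lists es hesnd hesmem]
      intro p hp
      exact (hgetD p hp).mp (hall2 p hp)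
    · intro hps p hp
      exact (hgetD p hp).mpr ((pairs_all_iff lists es hesnd hesmem).mpr hps.2 p hp)
  · simp only [hall, Bool.false_eq_true, if_false]
    constructor
    · intro h; exact absurd h (by simp)
    · intro hs
      exfalso
      rw [List.all_eq_true] at hall
      push_neg at hall
      obtain ⟨l, hl, hlen⟩ := hall
      exact hlen (by simpa using (ofList_length_iff l).mpr (hs.1 l hl))

-- ===== VERDICT (by name: the statement is the Claim_ definition above) =====
theorem check_all_elements_py_spec : Claim_equal_check_all_elements_py := by
  intro lists _ _
  unfold Spec_check_all_elements_py
  exact Bool.eq_iff_iff.mpr ((check_A_iff lists).trans (check_B_iff lists).symm)
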